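-- pv_equiv track=rewrite | github.com/lukaselflein/charge_optimization_folderstructure | bin/refactored_fitESPconstrained.py | symmetry_names_to_index_groups
-- ===== SOURCE A (Python) =====
-- def symmetry_names_to_index_groups(symm_names, ase2pmd):
--    """Transform atom-name based constraints to index-based constraints."""
--    symm_groups = []
--    for i in range(len(symm_names)):
--       names = symm_names[i]
--       symm_groups += [[]]
--       for ase_index, atom_residuum in ase2pmd.items():
--          # If the atom names match, pick the ase index
--          atom_name = atom_residuum[0]
--          if names[0] == atom_name:
--             # Every member of this group is supposed to have equal charge
--             symm_groups[i] += [ase_index]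
--          if names[1] == atom_name:
--             symm_groups[i] += [ase_index]
--    return symm_groups
-- ===== SOURCE B (Python) =====
-- def symmetry_names_to_index_groups(symm_names, ase2pmd):
--     """Transform atom-name based constraints to index-based constraints."""
--     symm_groups = [[] for _ in symm_names]
--     if not symm_names or not ase2pmd:
--         return symm_groups
--     # Inverted index: atom name -> group indices that requested it
--     # (a group registers twice when both its names are equal).
--     name_to_groups = {}
--     for i in range(len(symm_names)):
--         names = symm_names[i]
--         name_to_groups.setdefault(names[0], []).append(i)
--         name_to_groups.setdefault(names[1], []).append(i)
--     for ase_index, atom_residuum in ase2pmd.items():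
--         for i in name_to_groups.get(atom_residuum[0], ()):
--             symm_groups[i].append(ase_index)
--     return symm_groups
-- ===== Notes on version B (the rewrite author's own statement) =====
-- stated objective: alternative
-- what changed: B builds an inverted index from atom name to requesting group indices once and fills all groups in a single pass over ase2pmd, instead of A's rescanning of the whole ase2pmd dict for every constraint group.
import Mathlib
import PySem

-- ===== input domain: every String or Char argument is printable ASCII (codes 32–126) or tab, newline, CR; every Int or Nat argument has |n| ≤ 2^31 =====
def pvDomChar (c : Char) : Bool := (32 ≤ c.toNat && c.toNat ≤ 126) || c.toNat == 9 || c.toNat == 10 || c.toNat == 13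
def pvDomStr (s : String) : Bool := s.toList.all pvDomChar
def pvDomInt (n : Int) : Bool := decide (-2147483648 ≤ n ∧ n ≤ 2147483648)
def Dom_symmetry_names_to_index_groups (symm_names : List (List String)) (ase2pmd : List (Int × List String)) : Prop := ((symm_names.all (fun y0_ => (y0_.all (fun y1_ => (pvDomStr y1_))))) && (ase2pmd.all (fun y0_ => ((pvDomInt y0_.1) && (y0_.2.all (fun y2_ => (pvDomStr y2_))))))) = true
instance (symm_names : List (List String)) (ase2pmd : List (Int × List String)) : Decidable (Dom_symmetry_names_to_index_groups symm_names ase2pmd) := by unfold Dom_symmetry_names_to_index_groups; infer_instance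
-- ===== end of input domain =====

-- B replaces A's per-group rescans of ase2pmd by an inverted index (atom name -> requesting
-- group indices) followed by a single pass over ase2pmd (objective: alternative algorithm).

-- shared primitive wrappers: Python's names[k] resp. atom_residuum[0]
-- (the .getD defaults are never reached on inputs admitted by Pre_, where all indexing succeeds)
def pvName (names : List String) (k : Int) : String := (PySem.List.pyGet? names k).getD ""
def pvAtomName (p : Int × List String) : String := (PySem.List.pyGet? p.2 0).getD ""

-- ===== PORT A =====
def symmetry_names_to_index_groups (symm_names : List (List String)) (ase2pmd : List (Int × List String)) : List (List Int) :=
  (List.range symm_names.length).foldl (fun symm_groups i =>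
    let names := (PySem.List.pyGet? symm_names (Int.ofNat i)).getD []
    let symm_groups := symm_groups ++ [[]]
    ase2pmd.foldl (fun sg p =>
      let atom_name := pvAtomName p
      let sg := if pvName names 0 == atom_name then sg.set i (sg.getD i [] ++ [p.1]) else sg
      if pvName names 1 == atom_name then sg.set i (sg.getD i [] ++ [p.1]) else sg) symm_groups) []

-- ===== PORT B =====
-- name_to_groups.setdefault(s, []).append(i)
def pvRegister (d : PySem.Dict String (List Nat)) (s : String) (i : Nat) : PySem.Dict String (List Nat) :=
  d.modify s [] (· ++ [i])

def symmetry_names_to_index_groups_alt (symm_names : List (List String)) (ase2pmd : List (Int × List String)) : List (List Int) :=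
  let symm_groups : List (List Int) := symm_names.map (fun _ => [])
  if symm_names.isEmpty || ase2pmd.isEmpty then symm_groups
  else
    let name_to_groups := (List.range symm_names.length).foldl (fun d i =>
      let names := (PySem.List.pyGet? symm_names (Int.ofNat i)).getD []
      pvRegister (pvRegister d (pvName names 0) i) (pvName names 1) i) PySem.Dict.empty
    ase2pmd.foldl (fun gs p =>
      (name_to_groups.getD (pvAtomName p) []).foldl (fun gs i =>
        gs.set i (gs.getD i [] ++ [p.1])) gs) symm_groups

-- ===== PRECONDITION & SPEC =====
-- Pre_ excludes exactly the inputs on which the Python A raises an IndexError: when both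
-- arguments are nonempty, every name group must have length ≥ 2 and every residuum be nonempty.
def Pre_symmetry_names_to_index_groups (symm_names : List (List String)) (ase2pmd : List (Int × List String)) : Prop :=
  symm_names = [] ∨ ase2pmd = [] ∨ ((∀ g ∈ symm_names, 2 ≤ g.length) ∧ (∀ p ∈ ase2pmd, p.2 ≠ []))
instance (symm_names : List (List String)) (ase2pmd : List (Int × List String)) : Decidable (Pre_symmetry_names_to_index_groups symm_names ase2pmd) := by unfold Pre_symmetry_names_to_index_groups; infer_instance

def pvWitness_symmetry_names_to_index_groups : List (List String) × (List (Int × List String)) :=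
  ([["CA", "CB"], ["HA", "HA"]], [(0, ["CA", "RES"]), (1, ["HA", "RES"]), (2, ["CB", "RES"])])

def Spec_symmetry_names_to_index_groups (symm_names : List (List String)) (ase2pmd : List (Int × List String)) (out : List (List Int)) : Prop := out = symmetry_names_to_index_groups_alt symm_names ase2pmd
instance (symm_names : List (List String)) (ase2pmd : List (Int × List String)) (out : List (List Int)) : Decidable (Spec_symmetry_names_to_index_groups symm_names ase2pmd out) := by unfold Spec_symmetry_names_to_index_groups; infer_instance

-- ===== CLAIM (what is proved, stated in full; the proofs are below) =====
def Claim_equal_symmetry_names_to_index_groups : Prop := ∀ (symm_names : List (List String)) (ase2pmd : List (Int × List String)), Dom_symmetry_names_to_index_groups symm_names ase2pmd → Pre_symmetry_names_to_index_groups symm_names ase2pmd → Spec_symmetry_names_to_index_groups symm_names ase2pmd (symmetry_names_to_index_groups symm_names ase2pmd)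

-- ===== LEMMAS AND PROOFS =====

-- the per-item contribution to group j, as A computes it
def pvContrib (symm_names : List (List String)) (j : Nat) (p : Int × List String) : List Int :=
  let names := (PySem.List.pyGet? symm_names (Int.ofNat j)).getD []
  (if pvName names 0 == pvAtomName p then [p.1] else []) ++
  (if pvName names 1 == pvAtomName p then [p.1] else [])

-- the registration pairs (name, group index) B's inverted index is built from
def pvReg (symm_names : List (List String)) (i : Nat) : List (String × Nat) :=
  let names := (PySem.List.pyGet? symm_names (Int.ofNat i)).getD []
  [(pvName names 0, i), (pvName names 1, i)]

-- A's inner loop over ase2pmd only edits group i, appending its contributions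
theorem innerA_eq (symm_names : List (List String)) (l : List (Int × List String))
    (i : Nat) (sg : List (List Int)) (hi : i < sg.length) :
    l.foldl (fun sg p =>
      let atom_name := pvAtomName p
      let sg := if pvName ((PySem.List.pyGet? symm_names (Int.ofNat i)).getD []) 0 == atom_name then sg.set i (sg.getD i [] ++ [p.1]) else sg
      if pvName ((PySem.List.pyGet? symm_names (Int.ofNat i)).getD []) 1 == atom_name then sg.set i (sg.getD i [] ++ [p.1]) else sg) sg
    = sg.set i (sg.getD i [] ++ l.flatMap (pvContrib symm_names i)) := by
  induction l generalizing sg with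
  | nil =>
    rw [List.foldl_nil, List.flatMap_nil, List.append_nil, List.getD,
      List.getElem?_eq_getElem hi]
    exact (List.set_getElem_self ..).symm
  | cons p l ih =>
    rw [List.foldl_cons, ih _ (by dsimp only; split_ifs <;> simp [hi])]
    simp only [pvContrib, List.flatMap_cons]
    split_ifs <;>
      simp [List.getD, List.getElem?_set_self hi, List.set_set, List.append_assoc]

-- A's result, group by group
theorem portA_eq (symm_names : List (List String)) (ase2pmd : List (Int × List String)) :
    symmetry_names_to_index_groups symm_names ase2pmd
    = (List.range symm_names.length).map (fun j => ase2pmd.flatMap (pvContrib symm_names j)) := by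
  unfold symmetry_names_to_index_groups
  have gen : ∀ k : Nat, (List.range k).foldl (fun symm_groups i =>
      let names := (PySem.List.pyGet? symm_names (Int.ofNat i)).getD []
      let symm_groups := symm_groups ++ [[]]
      ase2pmd.foldl (fun sg p =>
        let atom_name := pvAtomName p
        let sg := if pvName names 0 == atom_name then sg.set i (sg.getD i [] ++ [p.1]) else sg
        if pvName names 1 == atom_name then sg.set i (sg.getD i [] ++ [p.1]) else sg) symm_groups) []
      = (List.range k).map (fun j => ase2pmd.flatMap (pvContrib symm_names j)) := by
    intro k
    induction k with
    | zero => rfl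
    | succ k ih =>
      rw [List.range_succ, List.foldl_append, ih, List.foldl_cons, List.foldl_nil]
      dsimp only
      rw [innerA_eq symm_names ase2pmd k _ (by simp)]
      have hlen : ((List.range k).map (fun j => ase2pmd.flatMap (pvContrib symm_names j))).length = k := by simp
      rw [List.map_append, List.map_singleton]
      rw [List.getD, List.getElem?_append_right (by simp), hlen]
      simp [hlen]
  exact gen symm_names.length

-- B's index build is a fold over the flattened registration pairs
theorem build_eq_pairs (symm_names : List (List String)) (l : List Nat) (d : PySem.Dict String (List Nat)) :
    l.foldl (fun d i =>
      pvRegister (pvRegister d (pvName ((PySem.List.pyGet? symm_names (Int.ofNat i)).getD []) 0) i)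
        (pvName ((PySem.List.pyGet? symm_names (Int.ofNat i)).getD []) 1) i) d
    = (l.flatMap (pvReg symm_names)).foldl (fun d q => d.modify q.1 [] (· ++ [q.2])) d := by
  induction l generalizing d with
  | nil => rfl
  | cons i l ih =>
    rw [List.flatMap_cons, List.foldl_append, List.foldl_cons, ih]
    rfl

-- what B's inverted index returns for a name
theorem lookup_eq (symm_names : List (List String)) (s : String) :
    ((List.range symm_names.length).foldl (fun d i =>
      pvRegister (pvRegister d (pvName ((PySem.List.pyGet? symm_names (Int.ofNat i)).getD []) 0) i)
        (pvName ((PySem.List.pyGet? symm_names (Int.ofNat i)).getD []) 1) i) PySem.Dict.empty).getD s []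
    = ((((List.range symm_names.length).flatMap (pvReg symm_names)).filter (fun q => q.1 == s)).map (fun q => q.2)) := by
  rw [build_eq_pairs, PySem.Dict.getD_foldl_modify_append]
  simp

-- group j occurs in the index entry for s once per matching name of group j
theorem count_lookup (symm_names : List (List String)) (s : String) (j : Nat)
    (hj : j < symm_names.length) :
    List.count j (((((List.range symm_names.length).flatMap (pvReg symm_names)).filter (fun q => q.1 == s)).map (fun q => q.2)))
    = (if pvName ((PySem.List.pyGet? symm_names (Int.ofNat j)).getD []) 0 == s then 1 else 0)
      + (if pvName ((PySem.List.pyGet? symm_names (Int.ofNat j)).getD []) 1 == s then 1 else 0) := by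
  have gen : ∀ l : List Nat, List.count j ((((l.flatMap (pvReg symm_names)).filter (fun q => q.1 == s)).map (fun q => q.2)))
      = (l.count j) * ((if pvName ((PySem.List.pyGet? symm_names (Int.ofNat j)).getD []) 0 == s then 1 else 0)
        + (if pvName ((PySem.List.pyGet? symm_names (Int.ofNat j)).getD []) 1 == s then 1 else 0)) := by
    intro l
    induction l with
    | nil => simp
    | cons i l ih =>
      rw [List.flatMap_cons, List.filter_append, List.map_append, List.count_append, ih, List.count_cons]
      by_cases h : i = j
      · subst h
        simp only [pvReg]
        split_ifs <;> simp_all <;> ring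
      · have : List.count j (((pvReg symm_names i).filter (fun q => q.1 == s)).map (fun q => q.2)) = 0 := by
          simp only [pvReg, List.filter_cons, List.filter_nil]
          split_ifs <;> simp [h]
        rw [this]
        simp [h]
  rw [gen, List.count_eq_one_of_mem (List.nodup_range) (List.mem_range.mpr hj), one_mul]

theorem innerB_getD (x : Int) (L : List Nat) (gs : List (List Int)) (j : Nat) (hj : j < gs.length) :
    (L.foldl (fun gs i => gs.set i (gs.getD i [] ++ [x])) gs).getD j []
    = gs.getD j [] ++ List.replicate (L.count j) x := by
  induction L generalizing gs with
  | nil => simp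
  | cons i L ih =>
    rw [List.foldl_cons, ih _ (by simpa using hj), List.count_cons]
    by_cases h : i = j
    · subst h
      have h1 : (gs.set i (gs.getD i [] ++ [x])).getD i [] = gs.getD i [] ++ [x] := by
        simp [List.getD, List.getElem?_set_self hj]
      rw [h1]
      simp [List.replicate_succ, List.append_assoc]
    · have h1 : (gs.set i (gs.getD i [] ++ [x])).getD j [] = gs.getD j [] := by
        simp [List.getD, List.getElem?_set_ne h]
      rw [h1]
      simp [h]

theorem innerB_length (x : Int) (L : List Nat) (gs : List (List Int)) :
    (L.foldl (fun gs i => gs.set i (gs.getD i [] ++ [x])) gs).length = gs.length := by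
  induction L generalizing gs with
  | nil => rfl
  | cons i L ih => rw [List.foldl_cons, ih]; simp

-- B's single pass, with an abstract inverted index d
theorem passB_length (d : PySem.Dict String (List Nat)) (l : List (Int × List String)) (gs : List (List Int)) :
    (l.foldl (fun gs p => (d.getD (pvAtomName p) []).foldl (fun gs i => gs.set i (gs.getD i [] ++ [p.1])) gs) gs).length
    = gs.length := by
  induction l generalizing gs with
  | nil => rfl
  | cons p l ih => rw [List.foldl_cons, ih, innerB_length]

theorem passB_getD (d : PySem.Dict String (List Nat)) (l : List (Int × List String)) (gs : List (List Int))
    (j : Nat) (hj : j < gs.length) :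
    (l.foldl (fun gs p => (d.getD (pvAtomName p) []).foldl (fun gs i => gs.set i (gs.getD i [] ++ [p.1])) gs) gs).getD j []
    = gs.getD j [] ++ l.flatMap (fun p => List.replicate ((d.getD (pvAtomName p) []).count j) p.1) := by
  induction l generalizing gs with
  | nil => simp
  | cons p l ih =>
    rw [List.foldl_cons, ih _ (by rw [innerB_length]; exact hj),
      innerB_getD _ _ _ _ hj, List.flatMap_cons, List.append_assoc]

-- ===== VERDICT (by name: the statement is the Claim_ definition above) =====
theorem symmetry_names_to_index_groups_spec : Claim_equal_symmetry_names_to_index_groups := by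
  intro symm_names ase2pmd _dom _pre
  unfold Spec_symmetry_names_to_index_groups
  rw [portA_eq]
  unfold symmetry_names_to_index_groups_alt
  by_cases h1 : symm_names = []
  · subst h1; simp
  by_cases h2 : ase2pmd = []
  · subst h2
    simp [List.map_const']
  · rw [if_neg (by simp [List.isEmpty_iff, h1, h2])]
    dsimp only
    refine List.ext_getElem ?_ ?_
    · rw [passB_length]
      simp
    · intro j hjA hjB
      have hn : j < symm_names.length := by simpa using hjA
      have hgsd : (symm_names.map (fun _ => ([] : List Int))).getD j [] = [] := by
        rw [List.getD_eq_getElem _ [] (by simpa using hn)]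
        simp
      rw [← List.getD_eq_getElem _ [] hjA, ← List.getD_eq_getElem _ [] hjB,
        passB_getD _ _ _ _ (by simpa using hn), hgsd, List.nil_append]
      have hfun : (fun p => List.replicate
          ((((List.range symm_names.length).foldl (fun d i =>
            pvRegister (pvRegister d (pvName ((PySem.List.pyGet? symm_names (Int.ofNat i)).getD []) 0) i)
              (pvName ((PySem.List.pyGet? symm_names (Int.ofNat i)).getD []) 1) i) PySem.Dict.empty).getD (pvAtomName p) []).count j) p.1)
          = fun p => pvContrib symm_names j p := by
        funext p
        rw [lookup_eq, count_lookup _ _ _ hn, List.replicate_add]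
        simp only [pvContrib]
        split_ifs <;> simp
      rw [hfun]
      have : ((List.range symm_names.length).map (fun j => ase2pmd.flatMap (pvContrib symm_names j))).getD j []
          = ase2pmd.flatMap (pvContrib symm_names j) := by
        rw [List.getD_eq_getElem _ [] (by simpa using hn)]
        simp
      rw [this]
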